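-- pv_equiv track=rewrite | github.com/armenkarakashian/QMC-Sign-Scaling | create_heis_defects.py | generate_triangular_ladder_edges
-- ===== SOURCE A (Python) =====
-- def label_spins(N):
--     bottom = list(range(1, N, 2))
--     top = list(range(2, N+1, 2))
--     return bottom, top
--
-- def generate_triangular_ladder_edges(N):
--     bottom, top = label_spins(N)
--     edges = []
--     n_rungs = len(bottom)
--     # Vertical "rungs"
--     for i in range(n_rungs):
--         edges.append((bottom[i], top[i]))
--     # Horizontal "legs" (bottom)
--     for i in range(n_rungs-1):
--         edges.append((bottom[i], bottom[i+1]))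
--     # Horizontal "legs" (top)
--     for i in range(n_rungs-1):
--         edges.append((top[i], top[i+1]))
--     # Diagonal "zig-zags"
--     for i in range(n_rungs-1):
--         edges.append((bottom[i], top[i+1]))
--     # Sort by lowest node, then by highest node
--     edges = sorted(edges, key=lambda x: (min(x), max(x)))
--     return edges
-- ===== SOURCE B (Python) =====
-- def generate_triangular_ladder_edges(N):
--     # Emit edges directly in sorted order: one pass over rung index i,
--     # each edge already (smaller, larger), ascending by (min, max) -> no sort needed.
--     n_rungs = max(N // 2, 0)
--     edges = []
--     for i in range(n_rungs):
--         b = 2 * i + 1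
--         edges.append((b, b + 1))
--         if i < n_rungs - 1:
--             edges.append((b, b + 2))
--             edges.append((b, b + 3))
--             edges.append((b + 1, b + 3))
--     return edges
-- ===== Notes on version B (the rewrite author's own statement) =====
-- stated objective: faster
-- what changed: B emits the edges in a single pass over the rung index, already in (min,max) order, replacing A's four category loops plus a comparison sort.
import Mathlib
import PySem

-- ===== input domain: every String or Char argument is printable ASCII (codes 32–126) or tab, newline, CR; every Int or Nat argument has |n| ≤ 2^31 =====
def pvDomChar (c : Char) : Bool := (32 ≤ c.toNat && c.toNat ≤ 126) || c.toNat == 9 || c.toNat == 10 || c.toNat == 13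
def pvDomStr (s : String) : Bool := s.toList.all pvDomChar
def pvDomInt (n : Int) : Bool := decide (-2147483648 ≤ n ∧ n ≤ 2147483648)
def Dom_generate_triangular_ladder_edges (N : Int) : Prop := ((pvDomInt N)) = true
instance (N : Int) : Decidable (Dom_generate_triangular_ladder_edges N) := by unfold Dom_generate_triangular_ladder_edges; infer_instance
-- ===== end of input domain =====

-- B replaces A's four category loops plus a sort by one pass over the rung index that
-- emits each edge already in (min, max)-sorted order, so B needs no sort call.


-- ===== PORT A =====
def label_spins (N : Int) : List Int × List Int :=
  (PySem.List.pyRange 1 N 2, PySem.List.pyRange 2 (N + 1) 2)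

def generate_triangular_ladder_edges (N : Int) : List (Int × Int) :=
  let bt := label_spins N
  let bottom := bt.1
  let top := bt.2
  let edges : List (Int × Int) := []
  let n_rungs : Int := (bottom.length : Int)
  -- Vertical "rungs"
  let edges := (PySem.List.pyRange 0 n_rungs 1).foldl
    (fun acc i => acc ++ [(PySem.List.pyGetD bottom i 0, PySem.List.pyGetD top i 0)]) edges
  -- Horizontal "legs" (bottom)
  let edges := (PySem.List.pyRange 0 (n_rungs - 1) 1).foldl
    (fun acc i => acc ++ [(PySem.List.pyGetD bottom i 0, PySem.List.pyGetD bottom (i + 1) 0)]) edges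
  -- Horizontal "legs" (top)
  let edges := (PySem.List.pyRange 0 (n_rungs - 1) 1).foldl
    (fun acc i => acc ++ [(PySem.List.pyGetD top i 0, PySem.List.pyGetD top (i + 1) 0)]) edges
  -- Diagonal "zig-zags"
  let edges := (PySem.List.pyRange 0 (n_rungs - 1) 1).foldl
    (fun acc i => acc ++ [(PySem.List.pyGetD bottom i 0, PySem.List.pyGetD top (i + 1) 0)]) edges
  -- Sort by lowest node, then by highest node
  PySem.List.sorted2 edges (fun x => min x.1 x.2) (fun x => max x.1 x.2)

-- ===== PORT B =====
def generate_triangular_ladder_edges_alt (N : Int) : List (Int × Int) :=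
  let n_rungs : Int := max (PySem.Int.floordiv N 2) 0
  (PySem.List.pyRange 0 n_rungs 1).foldl
    (fun acc i =>
      let b := 2 * i + 1
      let acc := acc ++ [(b, b + 1)]
      if i < n_rungs - 1 then acc ++ [(b, b + 2), (b, b + 3), (b + 1, b + 3)] else acc) []

-- ===== PRECONDITION & SPEC =====
def Spec_generate_triangular_ladder_edges (N : Int) (out : List (Int × Int)) : Prop := out = generate_triangular_ladder_edges_alt N
instance (N : Int) (out : List (Int × Int)) : Decidable (Spec_generate_triangular_ladder_edges N out) := by unfold Spec_generate_triangular_ladder_edges; infer_instance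

-- ===== CLAIM (what is proved, stated in full; the proofs are below) =====
def Claim_equal_generate_triangular_ladder_edges : Prop := ∀ (N : Int), Dom_generate_triangular_ladder_edges N → Spec_generate_triangular_ladder_edges N (generate_triangular_ladder_edges N)

-- ===== LEMMAS AND PROOFS =====

-- number of rungs, as a Nat
def pvN (N : Int) : Nat := if 1 < N then ((N : Int) / 2).toNat else 0

-- one full interior block of edges at rung k, and the common sorted edge list
def pvBlock (k : Nat) : List (Int × Int) :=
  [((2 * k + 1 : Int), (2 * k + 2 : Int)), ((2 * k + 1 : Int), (2 * k + 3 : Int)),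
   ((2 * k + 1 : Int), (2 * k + 4 : Int)), ((2 * k + 2 : Int), (2 * k + 4 : Int))]

def pvTarget (n : Nat) : List (Int × Int) :=
  match n with
  | 0 => []
  | m + 1 => (List.range m).flatMap pvBlock ++ [((2 * m + 1 : Int), (2 * m + 2 : Int))]

-- B computes pvTarget
theorem alt_eq_target (N : Int) :
    generate_triangular_ladder_edges_alt N = pvTarget (pvN N) := by
  have hn : max (PySem.Int.floordiv N 2) 0 = ((pvN N : Nat) : Int) := by
    rw [PySem.Int.floordiv_eq_ediv_of_pos (by norm_num)]
    unfold pvN; split <;> omega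
  unfold generate_triangular_ladder_edges_alt
  rw [hn]
  have hbody : (fun (acc : List (Int × Int)) (i : Int) =>
      let b := 2 * i + 1
      let acc := acc ++ [(b, b + 1)]
      if i < ((pvN N : Nat) : Int) - 1 then acc ++ [(b, b + 2), (b, b + 3), (b + 1, b + 3)] else acc)
      = fun acc i => acc ++ (if i < ((pvN N : Nat) : Int) - 1 then
          [(2 * i + 1, 2 * i + 2), (2 * i + 1, 2 * i + 3), (2 * i + 1, 2 * i + 4), (2 * i + 2, 2 * i + 4)]
        else [(2 * i + 1, 2 * i + 2)]) := by
    funext acc i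
    by_cases h : i < ((pvN N : Nat) : Int) - 1 <;> simp [h] <;> omega
  simp only [hbody, PySem.List.foldl_append_eq_flatMap, PySem.List.pyRange_zero_natCast,
    List.flatMap_map, List.nil_append]
  generalize pvN N = n
  cases n with
  | zero => simp [pvTarget]
  | succ m =>
    rw [show List.range (m + 1) = List.range m ++ [m] from List.range_succ, List.flatMap_append]
    unfold pvTarget
    congr 1
    · refine List.flatMap_congr fun k hk => ?_
      rw [List.mem_range] at hk
      rw [if_pos (by push_cast; omega)]
      simp [pvBlock]
    · simp only [List.flatMap_cons, List.flatMap_nil]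
      rw [if_neg (by push_cast; omega)]
      norm_num

-- sorted2 is sorted with the lexicographic pair key
theorem sorted2_eq_sorted_lex {α κ₁ κ₂ : Type} [LinearOrder κ₁] [LinearOrder κ₂]
    (xs : List α) (k1 : α → κ₁) (k2 : α → κ₂) (r : Bool) :
    PySem.List.sorted2 xs k1 k2 r = PySem.List.sorted xs (fun a => toLex (k1 a, k2 a)) r := by
  have hc : ∀ a b : α, (decide (k1 a < k1 b) || (!decide (k1 b < k1 a) && decide (k2 a < k2 b)))
      = decide ((toLex (k1 a, k2 a) : Lex (κ₁ × κ₂)) < toLex (k1 b, k2 b)) := by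
    intro a b
    rcases lt_trichotomy (k1 a) (k1 b) with h | h | h
    · simp [Prod.Lex.lt_iff, h, lt_asymm h]
    · simp [Prod.Lex.lt_iff, h]
    · simp [Prod.Lex.lt_iff, h, lt_asymm h, h.ne']
  have h1 : (fun a b : α => decide (k1 a < k1 b) || (!decide (k1 b < k1 a) && decide (k2 a < k2 b)))
      = fun a b : α => decide ((toLex (k1 a, k2 a) : Lex (κ₁ × κ₂)) < toLex (k1 b, k2 b)) :=
    funext fun a => funext fun b => hc a b
  have h2 : (fun a b : α => decide (k1 b < k1 a) || (!decide (k1 a < k1 b) && decide (k2 b < k2 a)))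
      = fun a b : α => decide ((toLex (k1 b, k2 b) : Lex (κ₁ × κ₂)) < toLex (k1 a, k2 a)) :=
    funext fun a => funext fun b => hc b a
  simp only [PySem.List.sorted2, PySem.List.sorted, h1, h2]

-- bounds for the entries of a block
theorem block_bounds (k : Nat) : ∀ x ∈ pvBlock k,
    (2 * k + 1 : Int) ≤ x.1 ∧ x.1 ≤ 2 * k + 2 ∧ x.1 < x.2 ∧ x.2 ≤ 2 * k + 4 := by
  simp only [pvBlock, List.mem_cons, List.not_mem_nil, or_false]
  rintro x (rfl | rfl | rfl | rfl) <;> exact ⟨by omega, by omega, by omega, by omega⟩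

-- the target is strictly increasing in the (min, max) lex key
theorem flat_pairwise (n : Nat) :
    ((List.range n).flatMap pvBlock).Pairwise (fun a b =>
      (toLex (min a.1 a.2, max a.1 a.2) : Lex (Int × Int)) < toLex (min b.1 b.2, max b.1 b.2)) := by
  induction n with
  | zero => simp
  | succ m ih =>
    rw [List.range_succ, List.flatMap_append, List.pairwise_append]
    refine ⟨ih, ?_, ?_⟩
    · simp only [List.flatMap_cons, List.flatMap_nil, List.append_nil, pvBlock]
      simp [Prod.Lex.lt_iff]
    · intro x hx y hy
      simp only [List.mem_flatMap, List.mem_range] at hx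
      obtain ⟨k, hk, hxk⟩ := hx
      obtain ⟨h1, h2, h3, h4⟩ := block_bounds k x hxk
      simp only [List.flatMap_cons, List.flatMap_nil, List.append_nil] at hy
      obtain ⟨g1, g2, g3, g4⟩ := block_bounds m y hy
      rw [Prod.Lex.lt_iff]
      left; simp; omega

theorem target_pairwise (n : Nat) :
    (pvTarget n).Pairwise (fun a b =>
      (toLex (min a.1 a.2, max a.1 a.2) : Lex (Int × Int)) < toLex (min b.1 b.2, max b.1 b.2)) := by
  cases n with
  | zero => simp [pvTarget]
  | succ m =>
    rw [pvTarget, List.pairwise_append]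
    refine ⟨flat_pairwise m, by simp, ?_⟩
    intro x hx y hy
    simp only [List.mem_flatMap, List.mem_range] at hx
    obtain ⟨k, hk, hxk⟩ := hx
    obtain ⟨h1, h2, h3, h4⟩ := block_bounds k x hxk
    simp only [List.mem_singleton] at hy
    subst hy
    rw [Prod.Lex.lt_iff]
    left; simp; omega

-- the flattened blocks as a multiset are the four category lists
theorem flat_multiset (m : Nat) :
    (((List.range m).flatMap pvBlock : List (Int × Int)) : Multiset (Int × Int))
      = (((List.range m).map (fun k : Nat => ((2 * (k:Int) + 1, 2 * (k:Int) + 2) : Int × Int)) : List (Int × Int)) : Multiset (Int × Int))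
        + ((List.range m).map (fun k : Nat => ((2 * (k:Int) + 1, 2 * (k:Int) + 3) : Int × Int)) : List (Int × Int))
        + ((List.range m).map (fun k : Nat => ((2 * (k:Int) + 2, 2 * (k:Int) + 4) : Int × Int)) : List (Int × Int))
        + ((List.range m).map (fun k : Nat => ((2 * (k:Int) + 1, 2 * (k:Int) + 4) : Int × Int)) : List (Int × Int)) := by
  induction m with
  | zero => simp
  | succ m ih =>
    simp only [List.range_succ, List.flatMap_append, List.map_append, ← Multiset.coe_add,
      List.flatMap_cons, List.flatMap_nil, List.append_nil, List.map_cons, List.map_nil]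
    rw [ih]
    rw [show ((pvBlock m : List (Int × Int)) : Multiset (Int × Int))
        = ↑[((2 * m + 1 : Int), (2 * m + 2 : Int))] + ↑[((2 * m + 1 : Int), (2 * m + 3 : Int))]
          + ↑[((2 * m + 1 : Int), (2 * m + 4 : Int))] + ↑[((2 * m + 2 : Int), (2 * m + 4 : Int))] from by
      simp only [pvBlock]; rfl]
    abel

-- A's unsorted list is a permutation of the target
theorem target_perm (m : Nat) :
    (pvTarget (m + 1)).Perm
      ((List.range (m + 1)).map (fun k : Nat => ((2 * (k:Int) + 1, 2 * (k:Int) + 2) : Int × Int))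
        ++ (List.range m).map (fun k : Nat => ((2 * (k:Int) + 1, 2 * (k:Int) + 3) : Int × Int))
        ++ (List.range m).map (fun k : Nat => ((2 * (k:Int) + 2, 2 * (k:Int) + 4) : Int × Int))
        ++ (List.range m).map (fun k : Nat => ((2 * (k:Int) + 1, 2 * (k:Int) + 4) : Int × Int))) := by
  rw [← Multiset.coe_eq_coe]
  simp only [pvTarget, ← Multiset.coe_add]
  rw [flat_multiset m]
  simp only [List.range_succ, List.map_append, List.map_cons, List.map_nil, ← Multiset.coe_add]
  push_cast
  abel

-- the two spin rows
theorem bottom_eq (N : Int) :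
    PySem.List.pyRange 1 N 2 = (List.range (pvN N)).map (fun k : Nat => (1 + 2 * (k : Int))) := by
  rw [PySem.List.pyRange_of_pos 1 N (by norm_num)]
  congr 1
  unfold pvN
  by_cases h : 1 < N <;> simp [h]
  congr 1; omega

theorem top_eq (N : Int) :
    PySem.List.pyRange 2 (N + 1) 2 = (List.range (pvN N)).map (fun k : Nat => (2 + 2 * (k : Int))) := by
  rw [PySem.List.pyRange_of_pos 2 (N + 1) (by norm_num)]
  congr 1
  unfold pvN
  by_cases h : 1 < N
  · rw [if_pos (by omega), if_pos h]; congr 1; omega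
  · rw [if_neg (by omega), if_neg h]

-- indexing the rows
theorem getD_linmap (c : Int) (n k : Nat) (hk : k < n) :
    PySem.List.pyGetD ((List.range n).map (fun j : Nat => (c + 2 * (j : Int)))) (k : Int) 0
      = c + 2 * (k : Int) := by
  rw [PySem.List.pyGetD_natCast]
  simp [List.getD_eq_getElem?_getD, hk]

-- one category loop of A, reduced to a map
theorem loop_eq_map (n : Nat) (acc : List (Int × Int)) (g : Int → Int × Int) :
    (PySem.List.pyRange 0 (n : Int) 1).foldl (fun acc i => acc ++ [g i]) acc
      = acc ++ (List.range n).map (fun k : Nat => g (k : Int)) := by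
  rw [PySem.List.pyRange_zero_natCast, List.foldl_map, PySem.List.foldl_append_singleton_eq_map]

theorem cast_pred (m : Nat) : ((m + 1 : Nat) : Int) - 1 = ((m : Nat) : Int) := by push_cast; ring

-- ===== VERDICT (by name: the statement is the Claim_ definition above) =====
theorem generate_triangular_ladder_edges_spec : Claim_equal_generate_triangular_ladder_edges := by
  intro N _
  unfold Spec_generate_triangular_ladder_edges
  rw [alt_eq_target]
  unfold generate_triangular_ladder_edges label_spins
  simp only [bottom_eq, top_eq]
  by_cases hN : 1 < N
  case neg =>
    have h0 : pvN N = 0 := by unfold pvN; rw [if_neg hN]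
    rw [h0]
    simp [pvTarget, PySem.List.pyRange_one_eq_nil (by norm_num : (-1 : Int) ≤ 0),
      PySem.List.sorted2]
  case pos =>
  obtain ⟨m, hm⟩ : ∃ m, pvN N = m + 1 := ⟨pvN N - 1, by unfold pvN; rw [if_pos hN]; omega⟩
  rw [hm]
  simp only [List.length_map, List.length_range, cast_pred]
  rw [loop_eq_map, loop_eq_map, loop_eq_map, loop_eq_map]
  simp only [List.nil_append]
  rw [sorted2_eq_sorted_lex]
  refine PySem.List.sorted_eq_of_perm_of_pairwise_lt _ _ _ ?_ (target_pairwise _)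
  refine (target_perm m).trans (List.Perm.of_eq ?_)
  have hcast : ∀ k : Nat, ((k : Int) + 1) = ((k + 1 : Nat) : Int) := by intro k; push_cast; ring
  congr 1
  · congr 1
    · congr 1
      · refine List.map_congr_left fun k hk => ?_
        rw [List.mem_range] at hk
        rw [getD_linmap 1 (m+1) k hk, getD_linmap 2 (m+1) k hk, Prod.mk.injEq]
        exact ⟨by ring, by ring⟩
      · refine List.map_congr_left fun k hk => ?_
        rw [List.mem_range] at hk
        rw [hcast k, getD_linmap 1 (m+1) k (by omega), getD_linmap 1 (m+1) (k+1) (by omega),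
          Prod.mk.injEq]
        exact ⟨by ring, by push_cast; ring⟩
    · refine List.map_congr_left fun k hk => ?_
      rw [List.mem_range] at hk
      rw [hcast k, getD_linmap 2 (m+1) k (by omega), getD_linmap 2 (m+1) (k+1) (by omega),
        Prod.mk.injEq]
      exact ⟨by ring, by push_cast; ring⟩
  · refine List.map_congr_left fun k hk => ?_
    rw [List.mem_range] at hk
    rw [hcast k, getD_linmap 1 (m+1) k (by omega), getD_linmap 2 (m+1) (k+1) (by omega),
      Prod.mk.injEq]
    exact ⟨by ring, by push_cast; ring⟩
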